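-- pv_equiv track=rewrite | github.com/PreludeAndFugue/AdventOfCode | 2019/python/day16.py | fft2
-- ===== SOURCE A (Python) =====
-- def fft2(digits):
--     s = sum(digits)
--     new_digits = [s % 10]
--     for i in digits[:-1]:
--         s -= i
--         m = s % 10
--         new_digits.append(m)
--     return new_digits
-- ===== SOURCE B (Python) =====
-- def fft2(digits):
--     acc = 0
--     out = []
--     for d in reversed(digits):
--         acc += d
--         out.append(acc % 10)
--     out.reverse()
--     return out
-- ===== Notes on version B (the rewrite author's own statement) =====
-- stated objective: simpler
-- what changed: Builds the suffix sums with a right-to-left running accumulator over reversed(digits) and one final reverse, instead of precomputing the total with sum() and repeatedly subtracting prefix elements taken from digits[:-1].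
-- intended difference: On the empty input list A returns a one-element list holding sum of nothing mod 10 (the leftover seed entry), while B returns the empty list; the transform is length-preserving, so the empty output is the intended value. — e.g. on fft2([]): A returns [0], B returns []
import Mathlib
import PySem

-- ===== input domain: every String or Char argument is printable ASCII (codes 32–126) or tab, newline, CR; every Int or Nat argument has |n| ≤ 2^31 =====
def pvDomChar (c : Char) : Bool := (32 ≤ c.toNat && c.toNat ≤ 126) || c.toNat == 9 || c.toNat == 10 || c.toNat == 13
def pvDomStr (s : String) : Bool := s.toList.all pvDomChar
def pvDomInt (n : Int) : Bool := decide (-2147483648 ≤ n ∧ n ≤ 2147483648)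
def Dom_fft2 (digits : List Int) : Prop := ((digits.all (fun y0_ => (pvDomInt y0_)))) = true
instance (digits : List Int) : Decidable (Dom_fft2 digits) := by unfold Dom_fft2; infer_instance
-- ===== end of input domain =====

-- B replaces A's "precompute sum(digits), then subtract prefix elements from digits[:-1]"
-- with a right-to-left running accumulator over reversed(digits) plus one final reverse (objective: simpler).

-- ===== PORT A =====
-- the 'for i in digits[:-1]' loop of A, carrying (s, new_digits)
def fft2Loop (s : Int) (xs : List Int) (acc : List Int) : List Int :=
  match xs with
  | [] => acc
  | i :: rest => fft2Loop (s - i) rest (acc ++ [PySem.Int.mod (s - i) 10])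

def fft2 (digits : List Int) : List Int :=
  let s := digits.foldl (· + ·) 0
  fft2Loop s (PySem.List.slice digits none (some (-1))) [PySem.Int.mod s 10]

-- ===== PORT B =====
def fft2_alt (digits : List Int) : List Int :=
  let st := digits.reverse.foldl
    (fun (st : Int × List Int) d => (st.1 + d, st.2 ++ [PySem.Int.mod (st.1 + d) 10]))
    (0, [])
  st.2.reverse

-- ===== PRECONDITION & SPEC =====
-- On the empty input list A returns a one-element list holding sum of nothing mod 10 (the leftover
-- seed entry), while B returns the empty list; the transform is length-preserving, so the empty output is the intended value.
def D_fft2 (digits : List Int) : Prop := digits = []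
instance (digits : List Int) : Decidable (D_fft2 digits) := by unfold D_fft2; infer_instance
def Spec_fft2 (digits : List Int) (out : List Int) : Prop := ¬ D_fft2 digits → out = fft2_alt digits
instance (digits : List Int) (out : List Int) : Decidable (Spec_fft2 digits out) := by unfold Spec_fft2; infer_instance
def pvDiffWitness_fft2 : List Int := []
def pvDiffWitnessOut_fft2 : (List Int) × (List Int) := ([0], [])

-- ===== CLAIM (what is proved, stated in full; the proofs are below) =====
def Claim_unchanged_fft2 : Prop := ∀ (digits : List Int), Dom_fft2 digits → Spec_fft2 digits (fft2 digits)
def Claim_changed_fft2 : Prop := Dom_fft2 (pvDiffWitness_fft2) ∧ D_fft2 (pvDiffWitness_fft2) ∧ fft2 (pvDiffWitness_fft2) = pvDiffWitnessOut_fft2.1 ∧ fft2_alt (pvDiffWitness_fft2) = pvDiffWitnessOut_fft2.2 ∧ pvDiffWitnessOut_fft2.1 ≠ pvDiffWitnessOut_fft2.2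
def Claim_exact_fft2 : Prop := ∀ (digits : List Int), Dom_fft2 digits → D_fft2 digits → fft2 digits ≠ fft2_alt digits

-- ===== LEMMAS AND PROOFS =====

theorem foldl_add_eq_sum (xs : List Int) (a : Int) : xs.foldl (· + ·) a = a + xs.sum := by
  induction xs generalizing a with
  | nil => simp
  | cons x xs ih => simp [List.foldl, ih, add_assoc]

theorem fft2Loop_append (s : Int) (xs : List Int) (acc : List Int) :
    fft2Loop s xs acc = acc ++ fft2Loop s xs [] := by
  induction xs generalizing s acc with
  | nil => simp [fft2Loop]
  | cons x xs ih =>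
    rw [fft2Loop, fft2Loop]
    simp only [List.nil_append]
    rw [ih, ih (s - x) [PySem.Int.mod (s - x) 10]]
    simp

-- B's fold: the accumulator component is the running sum
theorem altFold_fst (xs : List Int) (a : Int) (o : List Int) :
    (xs.foldl (fun (st : Int × List Int) d => (st.1 + d, st.2 ++ [PySem.Int.mod (st.1 + d) 10])) (a, o)).1
      = a + xs.sum := by
  induction xs generalizing a o with
  | nil => simp
  | cons x xs ih =>
    simp only [List.foldl_cons, List.sum_cons]
    rw [ih]; ring

theorem fft2_alt_cons (d : Int) (ds : List Int) :
    fft2_alt (d :: ds) = PySem.Int.mod (d + ds.sum) 10 :: fft2_alt ds := by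
  simp only [fft2_alt, List.reverse_cons, List.foldl_append]
  set p := ds.reverse.foldl (fun (st : Int × List Int) d => (st.1 + d, st.2 ++ [PySem.Int.mod (st.1 + d) 10])) (0, ([] : List Int)) with hp
  have h1 : p.1 = ds.sum := by rw [hp, altFold_fst]; simp
  simp [h1, add_comm]

theorem fft2_alt_nil : fft2_alt [] = [] := by decide

theorem fft2_cons (d : Int) (ds : List Int) (h : ds ≠ []) :
    fft2 (d :: ds) = PySem.Int.mod (d + ds.sum) 10 :: fft2 ds := by
  have hdl : (d :: ds).dropLast = d :: ds.dropLast := by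
    cases ds with
    | nil => exact absurd rfl h
    | cons e es => rfl
  have hs : (d :: ds).foldl (· + ·) 0 = d + ds.sum := by
    rw [List.foldl_cons, foldl_add_eq_sum]; ring
  have hs' : ds.foldl (· + ·) 0 = ds.sum := by rw [foldl_add_eq_sum]; ring
  show fft2Loop _ (PySem.List.slice (d :: ds) none (some (-1))) _ = _
  rw [PySem.List.slice_to_neg_one, hdl, hs]
  show _ = PySem.Int.mod (d + ds.sum) 10 ::
    fft2Loop (ds.foldl (· + ·) 0) (PySem.List.slice ds none (some (-1))) [PySem.Int.mod (ds.foldl (· + ·) 0) 10]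
  rw [PySem.List.slice_to_neg_one, hs']
  rw [fft2Loop]
  have hsub : d + ds.sum - d = ds.sum := by ring
  rw [hsub]
  rw [fft2Loop_append ds.sum ds.dropLast ([PySem.Int.mod (d + ds.sum) 10] ++ [PySem.Int.mod ds.sum 10]),
      fft2Loop_append ds.sum ds.dropLast [PySem.Int.mod ds.sum 10]]
  simp

theorem fft2_eq_alt_of_ne_nil (digits : List Int) (h : digits ≠ []) :
    fft2 digits = fft2_alt digits := by
  induction digits with
  | nil => exact absurd rfl h
  | cons d ds ih =>
    by_cases hds : ds = []
    · subst hds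
      simp only [fft2, fft2_alt_cons, fft2_alt_nil, PySem.List.slice_to_neg_one]
      simp [fft2Loop]
    · rw [fft2_cons d ds hds, fft2_alt_cons, ih hds]

-- ===== VERDICT (by name: the statement is the Claim_ definition above) =====
theorem fft2_spec : Claim_unchanged_fft2 := by
  intro digits _ hD
  exact fft2_eq_alt_of_ne_nil digits hD

theorem fft2_changed : Claim_changed_fft2 := by unfold Claim_changed_fft2; decide

theorem fft2_tight : Claim_exact_fft2 := by
  intro digits _ hD
  subst hD
  decide
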